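-- pv_equiv track=rewrite | github.com/MarcoA-Pozol/PythonConceptsLearning | Concepts/Pandas/pandas_series_alphabetical_index_generator.py | index_generation
-- ===== SOURCE A (Python) =====
-- import string
--
-- def index_generation(n:int):
--     """
--     Generates an indexes list.
--
--     Args:
--         n (int): The number of indexes to generate.
--
--     Returns:
--         list: List of generated indexes.
-- 	"""
--     result = []
--     i = 0
--     while len(result) < n:
--         name = ''
--         num = i
--         while True:
--             name = string.ascii_lowercase[num % 26] + name
--             num = num // 26 - 1
--             if num < 0:
--                 break
--         result.append(name)
--         i += 1
--
--     return result
-- ===== SOURCE B (Python) =====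
-- import string
--
-- def _incr(digits):
--     # increment a bijective base-26 digit list (most significant first), 0..25 per digit
--     if not digits:
--         return [0]
--     if digits[-1] == 25:
--         return _incr(digits[:-1]) + [0]
--     return digits[:-1] + [digits[-1] + 1]
--
-- def index_generation(n: int):
--     result = []
--     digits = [0]
--     count = 0
--     while count < n:
--         result.append(''.join(string.ascii_lowercase[d] for d in digits))
--         digits = _incr(digits)
--         count += 1
--     return result
-- ===== Notes on version B (the rewrite author's own statement) =====
-- stated objective: alternative
-- what changed: B maintains the current label as a bijective base-26 digit list and derives each label from the previous one by an odometer-style carry increment, instead of A's per-index conversion via repeated floor division.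
import Mathlib
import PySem

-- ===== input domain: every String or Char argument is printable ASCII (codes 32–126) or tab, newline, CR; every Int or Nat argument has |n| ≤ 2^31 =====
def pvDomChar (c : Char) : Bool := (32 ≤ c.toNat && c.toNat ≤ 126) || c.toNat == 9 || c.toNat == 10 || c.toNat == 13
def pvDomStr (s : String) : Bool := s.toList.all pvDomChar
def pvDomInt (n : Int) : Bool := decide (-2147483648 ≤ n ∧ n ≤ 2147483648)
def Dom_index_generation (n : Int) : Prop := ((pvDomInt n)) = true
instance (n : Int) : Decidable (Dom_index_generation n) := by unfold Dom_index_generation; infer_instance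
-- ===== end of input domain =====

-- B replaces A's per-index bijective base-26 division with an odometer-style increment of the
-- previous label's digit list (objective: alternative decomposition, similar cost).

-- string.ascii_lowercase, as a list of characters
def pvLower : List Char :=
  ['a','b','c','d','e','f','g','h','i','j','k','l','m','n','o','p','q','r','s','t','u','v','w','x','y','z']

-- ===== PORT A =====
-- A's inner `while True` loop; `name` is the string built so far (as List Char).
-- `fuel` only bounds the iteration count to make the loop total (num decreases each round,
-- so num.toNat + 1 rounds always suffice); the loop's own exit test is unchanged.
-- The index `num % 26` is always in [0, 26), so pyGetD's default is never used.
def pvNameGo (fuel : Nat) (num : Int) (name : List Char) : List Char :=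
  match fuel with
  | 0 => name
  | fuel + 1 =>
    let name' := PySem.List.pyGetD pvLower (PySem.Int.mod num 26) 'a' :: name
    let num' := PySem.Int.floordiv num 26 - 1
    if num' < 0 then name' else pvNameGo fuel num' name'

def pvNameLoop (num : Int) (name : List Char) : List Char :=
  pvNameGo (num.toNat + 1) num name

-- A's outer `while len(result) < n` loop, with counter i; fuel = remaining iterations.
def pvAGo (fuel : Nat) (n : Int) (i : Int) (result : List String) : List String :=
  match fuel with
  | 0 => result
  | fuel + 1 =>
    if (result.length : Int) < n then
      pvAGo fuel n (i + 1) (result ++ [String.ofList (pvNameLoop i [])])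
    else result

def index_generation (n : Int) : List String := pvAGo (n - 0).toNat n 0 []

-- ===== PORT B =====
-- Source B's _incr: increment a bijective base-26 digit list (most significant first).
-- fuel = ds.length + 1 bounds the recursion (one element is dropped per round).
def pvIncrGo (fuel : Nat) (ds : List Int) : List Int :=
  match fuel with
  | 0 => [0]
  | fuel + 1 =>
    if hne : ds = [] then [0]
    else if ds.getLast hne == 25 then pvIncrGo fuel ds.dropLast ++ [0]
    else ds.dropLast ++ [ds.getLast hne + 1]

def pvIncr (ds : List Int) : List Int := pvIncrGo (ds.length + 1) ds

-- ''.join(string.ascii_lowercase[d] for d in digits); each d is in [0, 26)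
def pvLabel (ds : List Int) : String :=
  String.ofList (ds.map (fun d => PySem.List.pyGetD pvLower d 'a'))

-- Source B's `while count < n` loop; fuel = remaining iterations.
def pvBGo (fuel : Nat) (n : Int) (count : Int) (digits : List Int) (result : List String) : List String :=
  match fuel with
  | 0 => result
  | fuel + 1 =>
    if count < n then
      pvBGo fuel n (count + 1) (pvIncr digits) (result ++ [pvLabel digits])
    else result

def index_generation_alt (n : Int) : List String := pvBGo (n - 0).toNat n 0 [0] []

-- ===== PRECONDITION & SPEC =====
def Spec_index_generation (n : Int) (out : List String) : Prop := out = index_generation_alt n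
instance (n : Int) (out : List String) : Decidable (Spec_index_generation n out) := by unfold Spec_index_generation; infer_instance

-- ===== CLAIM (what is proved, stated in full; the proofs are below) =====
def Claim_equal_index_generation : Prop := ∀ (n : Int), Dom_index_generation n → Spec_index_generation n (index_generation n)

-- ===== LEMMAS AND PROOFS =====

-- bijective base-26 representation of i (most significant digit first)
def pvRepr (i : Nat) : List Int :=
  if _h : i < 26 then [(i : Int)] else pvRepr (i / 26 - 1) ++ [((i % 26 : Nat) : Int)]
termination_by i
decreasing_by omega

lemma pvRepr_lt {i : Nat} (h : i < 26) : pvRepr i = [(i : Int)] := by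
  rw [pvRepr]; simp [h]

lemma pvRepr_ge {i : Nat} (h : ¬ i < 26) :
    pvRepr i = pvRepr (i / 26 - 1) ++ [((i % 26 : Nat) : Int)] := by
  rw [pvRepr]; simp [h]

lemma pvIncr_nil : pvIncr [] = [0] := rfl

lemma pvIncr_concat (xs : List Int) (d : Int) :
    pvIncr (xs ++ [d]) = if d == 25 then pvIncr xs ++ [0] else xs ++ [d + 1] := by
  have hne : xs ++ [d] ≠ [] := by simp
  show pvIncrGo ((xs ++ [d]).length + 1) (xs ++ [d]) = _
  rw [pvIncrGo]
  simp [hne, pvIncr]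

lemma pvNameGo_repr (i : Nat) (fuel : Nat) (hf : i < fuel) (name : List Char) :
    pvNameGo fuel (i : Int) name =
      (pvRepr i).map (fun d => PySem.List.pyGetD pvLower d 'a') ++ name := by
  induction i using Nat.strong_induction_on generalizing fuel name with
  | _ i ih =>
    obtain ⟨f, rfl⟩ : ∃ f, fuel = f + 1 := ⟨fuel - 1, by omega⟩
    rw [pvNameGo]
    have h26 : (0:Int) < 26 := by norm_num
    rw [PySem.Int.floordiv_eq_ediv_of_pos h26, PySem.Int.mod_eq_emod_of_pos h26]
    by_cases h : i < 26
    · have hdiv : (i : Int) / 26 - 1 < 0 := by omega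
      have hmod : (i : Int) % 26 = (i : Int) := by omega
      rw [pvRepr_lt h]
      simp [hdiv, hmod]
    · have hdiv : ¬ ((i : Int) / 26 - 1 < 0) := by omega
      have hcast : (i : Int) / 26 - 1 = ((i / 26 - 1 : Nat) : Int) := by omega
      have hmod : (i : Int) % 26 = ((i % 26 : Nat) : Int) := by omega
      simp only [hmod, hcast]
      rw [if_neg (by omega : ¬ ((((i / 26 - 1 : Nat)) : Int) < 0))]
      rw [ih (i / 26 - 1) (by omega) f (by omega), pvRepr_ge h]
      simp

lemma pvNameLoop_repr (i : Nat) (name : List Char) :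
    pvNameLoop (i : Int) name =
      (pvRepr i).map (fun d => PySem.List.pyGetD pvLower d 'a') ++ name := by
  unfold pvNameLoop
  exact pvNameGo_repr i (((i : Int)).toNat + 1) (by omega) name

lemma pvIncr_repr (i : Nat) : pvIncr (pvRepr i) = pvRepr (i + 1) := by
  induction i using Nat.strong_induction_on with
  | _ i ih =>
    by_cases h : i < 26
    · rw [pvRepr_lt h, show [(i:Int)] = [] ++ [(i:Int)] from rfl, pvIncr_concat]
      by_cases h25 : i = 25
      · subst h25
        rw [pvRepr_ge (by omega)]
        norm_num [pvIncr_nil, pvRepr_lt]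
      · have h1 : i + 1 < 26 := by omega
        rw [pvRepr_lt h1]
        have hb : ((i : Int) == 25) = false := by simp; omega
        simp [hb]
    · rw [pvRepr_ge h, pvIncr_concat]
      have h1 : ¬ (i + 1 < 26) := by omega
      rw [pvRepr_ge h1]
      by_cases hm : i % 26 = 25
      · have hb : (((i % 26 : Nat) : Int) == 25) = true := by simp [hm]
        rw [hb, if_pos rfl, ih (i / 26 - 1) (by omega)]
        have e1 : i / 26 - 1 + 1 = (i + 1) / 26 - 1 := by omega
        have e2 : ((i + 1) % 26 : Nat) = 0 := by omega
        rw [e1, e2]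
        norm_num
      · have hb : (((i % 26 : Nat) : Int) == 25) = false := by simp; omega
        rw [hb, if_neg (by simp)]
        have e1 : i / 26 - 1 = (i + 1) / 26 - 1 := by omega
        have e2 : (((i + 1) % 26 : Nat) : Int) = ((i % 26 : Nat) : Int) + 1 := by
          push_cast; omega
        rw [e1, e2]

lemma pvLoop_eq (k : Nat) (n : Int) (res : List String) :
    pvAGo k n (res.length) res = pvBGo k n (res.length) (pvRepr res.length) res := by
  induction k generalizing res with
  | zero => rw [pvAGo, pvBGo]
  | succ k ih =>
    rw [pvAGo, pvBGo]
    by_cases h : (res.length : Int) < n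
    · rw [if_pos h, if_pos h]
      have hlab : String.ofList (pvNameLoop (res.length : Int) []) = pvLabel (pvRepr res.length) := by
        rw [pvNameLoop_repr]
        simp [pvLabel]
      rw [hlab, pvIncr_repr]
      have := ih (res ++ [pvLabel (pvRepr res.length)])
      simp only [List.length_append, List.length_cons, List.length_nil] at this
      push_cast at this ⊢
      simpa using this
    · rw [if_neg h, if_neg h]

-- ===== VERDICT (by name: the statement is the Claim_ definition above) =====
theorem index_generation_spec : Claim_equal_index_generation := by
  intro n _
  unfold Spec_index_generation index_generation index_generation_alt
  have h0 : pvRepr 0 = [(0 : Int)] := pvRepr_lt (by omega)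
  have := pvLoop_eq (n - 0).toNat n []
  simpa [h0] using this
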